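-- pv_equiv track=rewrite | github.com/FarmGPU/netbox-agent | scripts/infra/credentials/sync_to_1password.py | build_op_fields
-- ===== SOURCE A (Python) =====
-- def escape_op_field(s):
--     """Escape periods, equals signs, and backslashes for op field names."""
--     s = s.replace("\\", "\\\\")
--     s = s.replace(".", "\\.")
--     s = s.replace("=", "\\=")
--     return s
--
-- def build_op_fields(entries):
--     """
--     Build op CLI field assignment strings for a list of credential entries.
--
--     Each device gets its own section keyed by asset tag.
--     Only Username and Password are stored -- everything else is in NetBox.
--     Password fields use [concealed] type for eye-icon toggle in 1Password UI.
--     """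
--     fields = []
--     seen_tags = set()
--
--     for asset_tag, user, pw in sorted(entries, key=lambda e: e[0]):
--         if asset_tag in seen_tags:
--             continue
--         seen_tags.add(asset_tag)
--
--         section = escape_op_field(asset_tag)
--         fields.append(f"{section}.Username[text]={user}")
--         if pw:
--             fields.append(f"{section}.Password[concealed]={pw}")
--         else:
--             fields.append(f"{section}.Password[concealed]=(not yet discovered)")
--
--     return fields
-- ===== SOURCE B (Python) =====
-- def escape_op_field(s):
--     """Escape periods, equals signs, and backslashes for op field names."""
--     s = s.replace("\\", "\\\\")
--     s = s.replace(".", "\\.")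
--     s = s.replace("=", "\\=")
--     return s
--
-- def build_op_fields(entries):
--     """
--     Sort once, then consume the sorted list group by group with an index
--     cursor: after the stable sort all entries sharing an asset tag are
--     adjacent, the group's leader is the original first occurrence, so the
--     rest of the group is skipped by advancing the cursor -- no seen-set
--     (and no dict) is maintained.
--     """
--     ordered = sorted(entries, key=lambda e: e[0])
--     fields = []
--     i, n = 0, len(ordered)
--     while i < n:
--         tag, user, pw = ordered[i]
--         i += 1
--         while i < n and ordered[i][0] == tag:
--             i += 1
--         section = escape_op_field(tag)
--         fields.append(f"{section}.Username[text]={user}")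
--         fields.append(f"{section}.Password[concealed]={pw or '(not yet discovered)'}")
--     return fields
-- ===== Notes on version B (the rewrite author's own statement) =====
-- stated objective: alternative
-- what changed: A folds over the sorted entries maintaining a seen-set and skipping any entry whose tag is already a member; B exploits that the stable sort makes equal tags adjacent (group leader = original first occurrence): an index cursor emits each group's leader and an inner loop advances past the rest of the group, so no seen-set or dict exists at all.
import Mathlib
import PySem

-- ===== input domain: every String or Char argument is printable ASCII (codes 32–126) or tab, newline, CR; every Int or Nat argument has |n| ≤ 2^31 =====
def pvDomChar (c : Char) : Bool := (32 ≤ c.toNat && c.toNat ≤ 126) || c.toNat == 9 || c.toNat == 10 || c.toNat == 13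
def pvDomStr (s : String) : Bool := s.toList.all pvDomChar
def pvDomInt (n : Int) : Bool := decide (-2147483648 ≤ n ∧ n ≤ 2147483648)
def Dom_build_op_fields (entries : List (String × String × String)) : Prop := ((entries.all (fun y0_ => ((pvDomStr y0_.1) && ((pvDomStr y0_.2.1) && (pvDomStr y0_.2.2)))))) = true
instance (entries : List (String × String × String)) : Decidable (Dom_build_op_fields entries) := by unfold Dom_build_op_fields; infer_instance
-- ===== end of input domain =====

-- B replaces A's seen-set skip guard by group-wise consumption of the sorted list with an
-- index cursor (equal tags are adjacent after the stable sort) — objective: alternative;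
-- same observable behaviour.

-- ===== PORT A =====
def escape_op_field (s : String) : String :=
  let s1 := PySem.Str.replace s "\\" "\\\\"
  let s2 := PySem.Str.replace s1 "." "\\."
  PySem.Str.replace s2 "=" "\\="

def build_op_fields (entries : List (String × String × String)) : List String :=
  ((PySem.List.sorted entries (fun e => e.1) false).foldl
    (fun (st : List String × PySem.Set String) e =>
      if e.1 ∈ st.2 then st
      else
        let seen := st.2.add e.1
        let sec := escape_op_field e.1
        let fields := st.1 ++ [sec ++ ".Username[text]=" ++ e.2.1]
        let fields := if e.2.2 ≠ "" then fields ++ [sec ++ ".Password[concealed]=" ++ e.2.2]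
          else fields ++ [sec ++ ".Password[concealed]=(not yet discovered)"]
        (fields, seen))
    ([], PySem.Set.ofList [])).1

-- ===== PORT B =====
-- Python's loop counter i only ever holds 0,1,2,…,n and is compared with n = len(ordered),
-- so Nat indices are exact; ordered[i] is read only under the guard i < n, so getD is exact.

-- inner 'while i < n and ordered[i][0] == tag: i += 1'
def pvSkipGroup (ordered : List (String × String × String)) (tag : String) (i : Nat) : Nat :=
  if i < ordered.length ∧ (ordered.getD i ("", "", "")).1 = tag then
    pvSkipGroup ordered tag (i + 1)
  else i
termination_by ordered.length - i
decreasing_by omega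

-- cursor monotonicity, cited by pvOuterLoop's decreasing_by
theorem pvSkipGroup_ge (ordered : List (String × String × String)) (tag : String) (i : Nat) :
    i ≤ pvSkipGroup ordered tag i := by
  rw [pvSkipGroup]
  split
  · have := pvSkipGroup_ge ordered tag (i + 1)
    omega
  · exact le_rfl
termination_by ordered.length - i
decreasing_by omega

-- outer 'while i < n: …'
def pvOuterLoop (ordered : List (String × String × String)) (fields : List String) (i : Nat) :
    List String :=
  if _h : i < ordered.length then
    let e := ordered.getD i ("", "", "")
    let j := pvSkipGroup ordered e.1 (i + 1)
    let sec := escape_op_field e.1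
    pvOuterLoop ordered
      (fields ++ [sec ++ ".Username[text]=" ++ e.2.1,
        sec ++ ".Password[concealed]=" ++ (if e.2.2 = "" then "(not yet discovered)" else e.2.2)])
      j
  else fields
termination_by ordered.length - i
decreasing_by
  have := pvSkipGroup_ge ordered (ordered.getD i ("", "", "")).1 (i + 1)
  omega

def build_op_fields_alt (entries : List (String × String × String)) : List String :=
  pvOuterLoop (PySem.List.sorted entries (fun e => e.1) false) [] 0

-- ===== PRECONDITION & SPEC =====
def Spec_build_op_fields (entries : List (String × String × String)) (out : List String) : Prop := out = build_op_fields_alt entries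
instance (entries : List (String × String × String)) (out : List String) : Decidable (Spec_build_op_fields entries out) := by unfold Spec_build_op_fields; infer_instance

-- ===== CLAIM (what is proved, stated in full; the proofs are below) =====
def Claim_equal_build_op_fields : Prop := ∀ (entries : List (String × String × String)), Dom_build_op_fields entries → Spec_build_op_fields entries (build_op_fields entries)

-- ===== LEMMAS AND PROOFS =====

-- first-occurrence filter: keeps each entry whose tag is new (not in `seen`), in order
def pvF (seen : List String) : List (String × String × String) → List (String × String × String)
  | [] => []
  | e :: t => if e.1 ∈ seen then pvF seen t else e :: pvF (seen ++ [e.1]) t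

-- the two op field strings one kept entry contributes
def pvEmitOne (e : String × String × String) : List String :=
  let sec := escape_op_field e.1
  [sec ++ ".Username[text]=" ++ e.2.1,
   sec ++ ".Password[concealed]=" ++ (if e.2.2 = "" then "(not yet discovered)" else e.2.2)]

def pvEmit (l : List (String × String × String)) : List String := l.flatMap pvEmitOne

-- list-level view of the inner cursor loop
def pvWhileDrop (tag : String) : List (String × String × String) → List (String × String × String)
  | [] => []
  | e :: t => if e.1 = tag then pvWhileDrop tag t else e :: t

theorem pvF_congr_mem (l : List (String × String × String)) : ∀ (s₁ s₂ : List String),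
    (∀ e ∈ l, (e.1 ∈ s₁ ↔ e.1 ∈ s₂)) → pvF s₁ l = pvF s₂ l := by
  induction l with
  | nil => intro _ _ _; rfl
  | cons e t ih =>
    intro s₁ s₂ h
    simp only [pvF]
    by_cases hm : e.1 ∈ s₁
    · rw [if_pos hm, if_pos ((h e (by simp)).mp hm)]
      exact ih _ _ (fun x hx => h x (by simp [hx]))
    · rw [if_neg hm, if_neg (fun hc => hm ((h e (by simp)).mpr hc))]
      refine congrArg _ (ih _ _ ?_)
      intro x hx
      simp [h x (by simp [hx])]

theorem pvA_loop (l : List (String × String × String)) : ∀ (acc : List String) (seen : List String),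
    ((l.foldl
      (fun (st : List String × PySem.Set String) e =>
        if e.1 ∈ st.2 then st
        else
          let seen := st.2.add e.1
          let sec := escape_op_field e.1
          let fields := st.1 ++ [sec ++ ".Username[text]=" ++ e.2.1]
          let fields := if e.2.2 ≠ "" then fields ++ [sec ++ ".Password[concealed]=" ++ e.2.2]
            else fields ++ [sec ++ ".Password[concealed]=(not yet discovered)"]
          (fields, seen))
      (acc, seen)).1) = acc ++ pvEmit (pvF seen l) := by
  induction l with
  | nil => intro acc seen; simp [pvF, pvEmit]
  | cons e t ih =>
    intro acc seen
    simp only [List.foldl_cons, pvF]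
    by_cases hm : e.1 ∈ seen
    · rw [if_pos hm, if_pos hm]
      exact ih acc seen
    · rw [if_neg hm, if_neg hm]
      rw [ih]
      rw [pvF_congr_mem t (PySem.Set.add seen e.1) (seen ++ [e.1])
        (fun x _ => by simp [PySem.Set.mem_add])]
      by_cases hp : e.2.2 = ""
      · simp [hp, pvEmit, pvEmitOne, String.append_assoc]
      · simp [hp, pvEmit, pvEmitOne]

-- over a tag-sorted tail whose tags all dominate a, skipping a equals dropping its group
theorem pvF_skip (t : List (String × String × String)) : ∀ (a : String),
    t.Pairwise (fun x y => x.1 ≤ y.1) → (∀ x ∈ t, a ≤ x.1) →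
    pvF [a] t = pvF [] (pvWhileDrop a t) := by
  induction t with
  | nil => intro a _ _; rfl
  | cons x t' ih =>
    intro a hp hd
    obtain ⟨hx, ht'⟩ := List.pairwise_cons.mp hp
    by_cases h : x.1 = a
    · simp only [pvWhileDrop, pvF]
      rw [if_pos h, if_pos (by simp [h])]
      exact ih a ht' (fun y hy => hd y (by simp [hy]))
    · have hlt : a < x.1 := lt_of_le_of_ne (hd x (by simp)) (fun hc => h hc.symm)
      simp only [pvWhileDrop, pvF]
      rw [if_neg h, if_neg (by simp [h])]
      simp only [pvF]
      rw [if_neg (by simp)]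
      refine congrArg _ (pvF_congr_mem t' _ _ ?_)
      intro y hy
      have hlty : a < y.1 := lt_of_lt_of_le hlt (hx y hy)
      simp [hlty.ne']

theorem pvSkipGroup_drop (ordered : List (String × String × String)) (tag : String) (i : Nat) :
    ordered.drop (pvSkipGroup ordered tag i) = pvWhileDrop tag (ordered.drop i) := by
  rw [pvSkipGroup]
  split
  next h =>
    rw [pvSkipGroup_drop ordered tag (i + 1)]
    rw [List.drop_eq_getElem_cons h.1]
    simp only [pvWhileDrop]
    rw [if_pos (by rw [← List.getD_eq_getElem ordered ("", "", "") h.1]; exact h.2)]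
  next h =>
    by_cases hlen : i < ordered.length
    · have hne : ¬ (ordered[i].1 = tag) := by
        intro hc
        exact h ⟨hlen, by rw [List.getD_eq_getElem ordered ("", "", "") hlen]; exact hc⟩
      conv_rhs => rw [List.drop_eq_getElem_cons hlen]
      simp only [pvWhileDrop]
      rw [if_neg hne, ← List.drop_eq_getElem_cons hlen]
    · have hnil : ordered.drop i = [] := List.drop_eq_nil_of_le (by omega)
      rw [hnil]
      rfl
termination_by ordered.length - i
decreasing_by omega

theorem pvOuter_emit (ordered : List (String × String × String))
    (hs : ordered.Pairwise (fun x y => x.1 ≤ y.1)) (i : Nat) (fields : List String) :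
    pvOuterLoop ordered fields i = fields ++ pvEmit (pvF [] (ordered.drop i)) := by
  rw [pvOuterLoop]
  split
  next h =>
    dsimp only
    rw [pvOuter_emit ordered hs _ _]
    have hget : ordered.getD i ("", "", "") = ordered[i] := List.getD_eq_getElem ordered _ h
    have hdrop : ordered.drop i = ordered[i] :: ordered.drop (i + 1) := List.drop_eq_getElem_cons h
    have hsd : (ordered.drop i).Pairwise (fun x y => x.1 ≤ y.1) :=
      hs.sublist (List.drop_sublist _ _)
    rw [hdrop] at hsd
    obtain ⟨hx, ht⟩ := List.pairwise_cons.mp hsd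
    rw [hget, pvSkipGroup_drop, ← pvF_skip _ _ ht hx, hdrop]
    simp [pvF, pvEmit, pvEmitOne]
  next h =>
    have hnil : ordered.drop i = [] := List.drop_eq_nil_of_le (by omega)
    simp [hnil, pvF, pvEmit]
termination_by ordered.length - i
decreasing_by
  have := pvSkipGroup_ge ordered (ordered.getD i ("", "", "")).1 (i + 1)
  omega

theorem pvMain (entries : List (String × String × String)) :
    build_op_fields entries = build_op_fields_alt entries := by
  have hs := PySem.List.sorted_pairwise entries (fun e => e.1)
  unfold build_op_fields build_op_fields_alt
  rw [pvA_loop, pvOuter_emit _ hs 0]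
  simp

-- ===== VERDICT (by name: the statement is the Claim_ definition above) =====
theorem build_op_fields_spec : Claim_equal_build_op_fields := by
  intro entries _
  exact pvMain entries
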